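-- pv_equiv track=rewrite | github.com/NickPittas/CleanIncomings | test_pattern_optimization.py | generate_test_filenames
-- ===== SOURCE A (Python) =====
-- def generate_test_filenames(count=1000):
--     """Generate test filenames for performance testing."""
--     test_files = []
--
--     shots = ["OLNT0010", "KITC0010", "WTFB0010", "IGB0010"]
--     tasks = ["beauty", "render", "comp", "plate"]
--     assets = ["FishFlock", "VrayRAW", "arnold", "cycles"]
--     versions = ["v001", "v002", "v003", "v010", "v055"]
--     resolutions = ["4k", "2k", "1080p", "12k"]
--
--     for i in range(count):
--         shot = shots[i % len(shots)]
--         task = tasks[i % len(tasks)]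
--         asset = assets[i % len(assets)]
--         version = versions[i % len(versions)]
--         resolution = resolutions[i % len(resolutions)]
--         frame = str(1001 + (i % 100)).zfill(4)
--
--         # Create various filename patterns
--         patterns = [
--             f"{shot}_{task}_{asset}_{version}_{resolution}.{frame}.exr",
--             f"{shot}_{task}_{version}.{frame}.jpg",
--             f"{asset}_{task}_{shot}_{version}.{frame}.png",
--             f"{shot}_{version}_{resolution}.{frame}.tiff",
--             f"{task}_{asset}_{shot}_{version}.{frame}.dpx"
--         ]
--
--         test_files.append(patterns[i % len(patterns)])
--
--     return test_files
-- ===== SOURCE B (Python) =====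
-- def generate_test_filenames(count=1000):
--     """Generate test filenames for performance testing.
--
--     The stream of names is periodic with period 100 (all selectors cycle with
--     period 4, 5 or 100), so build one period and tile it in whole blocks.
--     """
--     shots = ["OLNT0010", "KITC0010", "WTFB0010", "IGB0010"]
--     tasks = ["beauty", "render", "comp", "plate"]
--     assets = ["FishFlock", "VrayRAW", "arnold", "cycles"]
--     versions = ["v001", "v002", "v003", "v010", "v055"]
--     resolutions = ["4k", "2k", "1080p", "12k"]
--
--     def name(j):
--         shot = shots[j % 4]
--         task = tasks[j % 4]
--         asset = assets[j % 4]
--         version = versions[j % 5]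
--         resolution = resolutions[j % 4]
--         frame = str(1001 + j).zfill(4)
--         k = j % 5
--         if k == 0:
--             stem, ext = "_".join([shot, task, asset, version, resolution]), "exr"
--         elif k == 1:
--             stem, ext = "_".join([shot, task, version]), "jpg"
--         elif k == 2:
--             stem, ext = "_".join([asset, task, shot, version]), "png"
--         elif k == 3:
--             stem, ext = "_".join([shot, version, resolution]), "tiff"
--         else:
--             stem, ext = "_".join([task, asset, shot, version]), "dpx"
--         return ".".join([stem, frame, ext])
--
--     period = [name(j) for j in range(100)]
--     if count <= 0:
--         return []
--     full, rem = divmod(count, 100)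
--     return period * full + period[:rem]
-- ===== Notes on version B (the rewrite author's own statement) =====
-- stated objective: faster
-- what changed: B builds one 100-name period (choosing each pattern with an if-chain and join instead of building all five strings and indexing) and tiles it as period*(count//100) + period[:count%100], instead of re-formatting five strings per output item.
import Mathlib
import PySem

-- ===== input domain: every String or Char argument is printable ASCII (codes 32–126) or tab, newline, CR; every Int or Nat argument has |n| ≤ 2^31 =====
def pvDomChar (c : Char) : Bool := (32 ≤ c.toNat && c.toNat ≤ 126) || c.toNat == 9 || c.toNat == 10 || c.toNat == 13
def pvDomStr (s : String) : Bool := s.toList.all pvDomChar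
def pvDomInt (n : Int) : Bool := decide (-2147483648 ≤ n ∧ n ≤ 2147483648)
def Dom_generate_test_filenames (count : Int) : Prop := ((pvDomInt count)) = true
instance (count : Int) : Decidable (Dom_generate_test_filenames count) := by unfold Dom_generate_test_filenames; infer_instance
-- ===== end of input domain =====

-- B builds one 100-name period (if-chain + join) and tiles it in whole blocks; A formats five strings per item.

-- ===== PORT A =====
def pvShots : List String := ["OLNT0010", "KITC0010", "WTFB0010", "IGB0010"]
def pvTasks : List String := ["beauty", "render", "comp", "plate"]
def pvAssets : List String := ["FishFlock", "VrayRAW", "arnold", "cycles"]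
def pvVersions : List String := ["v001", "v002", "v003", "v010", "v055"]
def pvResolutions : List String := ["4k", "2k", "1080p", "12k"]

-- loop body of A for index i (the indices i % len(...) are always in range, so pyGetD)
def pvBodyA (i : Int) : String :=
  let shot := PySem.List.pyGetD pvShots (PySem.Int.mod i 4) ""
  let task := PySem.List.pyGetD pvTasks (PySem.Int.mod i 4) ""
  let asset := PySem.List.pyGetD pvAssets (PySem.Int.mod i 4) ""
  let version := PySem.List.pyGetD pvVersions (PySem.Int.mod i 5) ""
  let resolution := PySem.List.pyGetD pvResolutions (PySem.Int.mod i 4) ""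
  let frame := PySem.Str.zfill (PySem.Int.toStr (1001 + PySem.Int.mod i 100)) 4
  let patterns : List String :=
    [ shot ++ "_" ++ task ++ "_" ++ asset ++ "_" ++ version ++ "_" ++ resolution ++ "." ++ frame ++ ".exr",
      shot ++ "_" ++ task ++ "_" ++ version ++ "." ++ frame ++ ".jpg",
      asset ++ "_" ++ task ++ "_" ++ shot ++ "_" ++ version ++ "." ++ frame ++ ".png",
      shot ++ "_" ++ version ++ "_" ++ resolution ++ "." ++ frame ++ ".tiff",
      task ++ "_" ++ asset ++ "_" ++ shot ++ "_" ++ version ++ "." ++ frame ++ ".dpx" ]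
  PySem.List.pyGetD patterns (PySem.Int.mod i 5) ""

def generate_test_filenames (count : Int) : List String :=
  (PySem.List.pyRange 0 count 1).foldl (fun acc i => acc ++ [pvBodyA i]) []

-- ===== PORT B =====
-- B's helper name(j): picks ONE pattern with an if-chain on j % 5 and assembles it with join
def pvAltName (j : Int) : String :=
  let shot := PySem.List.pyGetD pvShots (PySem.Int.mod j 4) ""
  let task := PySem.List.pyGetD pvTasks (PySem.Int.mod j 4) ""
  let asset := PySem.List.pyGetD pvAssets (PySem.Int.mod j 4) ""
  let version := PySem.List.pyGetD pvVersions (PySem.Int.mod j 5) ""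
  let resolution := PySem.List.pyGetD pvResolutions (PySem.Int.mod j 4) ""
  let frame := PySem.Str.zfill (PySem.Int.toStr (1001 + j)) 4
  let k := PySem.Int.mod j 5
  let se : String × String :=
    if k = 0 then (PySem.Str.join "_" [shot, task, asset, version, resolution], "exr")
    else if k = 1 then (PySem.Str.join "_" [shot, task, version], "jpg")
    else if k = 2 then (PySem.Str.join "_" [asset, task, shot, version], "png")
    else if k = 3 then (PySem.Str.join "_" [shot, version, resolution], "tiff")
    else (PySem.Str.join "_" [task, asset, shot, version], "dpx")
  PySem.Str.join "." [se.1, frame, se.2]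

-- period = [name(j) for j in range(100)]
def pvPeriod : List String := (PySem.List.pyRange 0 100 1).map pvAltName

def generate_test_filenames_alt (count : Int) : List String :=
  if count ≤ 0 then []
  else
    -- full, rem = divmod(count, 100); period * full + period[:rem]
    PySem.List.pyRepeat pvPeriod (PySem.Int.floordiv count 100)
      ++ PySem.List.slice pvPeriod none (some (PySem.Int.mod count 100))

-- ===== PRECONDITION & SPEC =====
def Spec_generate_test_filenames (count : Int) (out : List String) : Prop := out = generate_test_filenames_alt count
instance (count : Int) (out : List String) : Decidable (Spec_generate_test_filenames count out) := by unfold Spec_generate_test_filenames; infer_instance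

-- ===== CLAIM (what is proved, stated in full; the proofs are below) =====
def Claim_equal_generate_test_filenames : Prop := ∀ (count : Int), Dom_generate_test_filenames count → Spec_generate_test_filenames count (generate_test_filenames count)

-- ===== LEMMAS AND PROOFS =====

-- A's body at index i only depends on i through i % 100
theorem pvBodyA_mod (i : Int) : pvBodyA i = pvBodyA (PySem.Int.mod i 100) := by
  have h4 : PySem.Int.mod (PySem.Int.mod i 100) 4 = PySem.Int.mod i 4 := by
    simp only [PySem.Int.mod_eq_emod_of_pos (show (0:Int) < 100 by norm_num),
               PySem.Int.mod_eq_emod_of_pos (show (0:Int) < 4 by norm_num)]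
    exact Int.emod_emod_of_dvd i (by norm_num)
  have h5 : PySem.Int.mod (PySem.Int.mod i 100) 5 = PySem.Int.mod i 5 := by
    simp only [PySem.Int.mod_eq_emod_of_pos (show (0:Int) < 100 by norm_num),
               PySem.Int.mod_eq_emod_of_pos (show (0:Int) < 5 by norm_num)]
    exact Int.emod_emod_of_dvd i (by norm_num)
  have h100 : PySem.Int.mod (PySem.Int.mod i 100) 100 = PySem.Int.mod i 100 := by
    simp only [PySem.Int.mod_eq_emod_of_pos (show (0:Int) < 100 by norm_num)]
    exact Int.emod_emod_of_dvd i (by norm_num)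
  unfold pvBodyA
  rw [h4, h5, h100]

-- one fully concrete period: A's five-pattern body agrees with B's if-chain body on 0..99
set_option maxHeartbeats 4000000 in
set_option maxRecDepth 100000 in
theorem pvPeriod_concrete : (List.range 100).map (fun k : Nat => pvBodyA (k : Int)) = pvPeriod := by decide

theorem pvPeriod_length : pvPeriod.length = 100 := by
  simp [pvPeriod, PySem.List.length_pyRange_one]

theorem pvBodyA_nat (k : Nat) :
    pvBodyA (k : Int) = pvPeriod.getD (k % 100) "" := by
  have hlt : k % 100 < 100 := Nat.mod_lt _ (by norm_num)
  have hmod : PySem.Int.mod (k : Int) 100 = ((k % 100 : Nat) : Int) := by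
    exact_mod_cast PySem.Int.mod_natCast k 100
  have hlen : k % 100 < ((List.range 100).map (fun k : Nat => pvBodyA (k : Int))).length := by
    simpa using hlt
  rw [pvBodyA_mod, hmod, ← pvPeriod_concrete, List.getD_eq_getElem _ _ hlen,
      List.getElem_map, List.getElem_range]

-- the tiling identity, for any list P of length 100
theorem pvTile (P : List String) (hP : P.length = 100) :
    ∀ n : Nat, (List.range n).map (fun k => P.getD (k % 100) "") =
      (List.replicate (n / 100) P).flatten ++ P.take (n % 100) := by
  intro n
  induction n with
  | zero => simp
  | succ n ih =>
    rw [List.range_succ, List.map_append, ih]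
    by_cases h : n % 100 = 99
    · have hdiv : (n + 1) / 100 = n / 100 + 1 := by omega
      have hmod : (n + 1) % 100 = 0 := by omega
      have h99 : (99 : Nat) < P.length := by omega
      have htake : P.take (n % 100) ++ [P.getD (n % 100) ""] = P := by
        rw [h, List.getD_eq_getElem P "" h99, ← List.take_succ_eq_append_getElem h99]
        exact List.take_of_length_le (by omega)
      rw [hdiv, hmod, List.replicate_succ', List.flatten_append, List.take_zero,
          List.append_nil, List.map_singleton, List.append_assoc, htake]
      simp
    · have hdiv : (n + 1) / 100 = n / 100 := by omega
      have hmod : (n + 1) % 100 = n % 100 + 1 := by omega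
      have hlt : n % 100 < P.length := by omega
      have hget : P.getD (n % 100) "" = P[n % 100]'hlt := List.getD_eq_getElem P "" hlt
      rw [hdiv, hmod, List.take_succ_eq_append_getElem hlt, List.map_singleton, hget,
          List.append_assoc]

-- ===== VERDICT (by name: the statement is the Claim_ definition above) =====
theorem generate_test_filenames_spec : Claim_equal_generate_test_filenames := by
  intro count _
  unfold Spec_generate_test_filenames generate_test_filenames generate_test_filenames_alt
  rw [PySem.List.foldl_append_singleton_eq_map (f := pvBodyA) (acc := []), List.nil_append]
  by_cases hc : count ≤ 0
  · rw [if_pos hc, PySem.List.pyRange_one_eq_nil hc, List.map_nil]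
  · rw [if_neg hc]
    have hc' : 0 ≤ count := le_of_lt (lt_of_not_ge hc)
    obtain ⟨n, rfl⟩ : ∃ n : Nat, count = (n : Int) := ⟨count.toNat, (Int.toNat_of_nonneg hc').symm⟩
    rw [PySem.List.pyRange_one 0 n]
    simp only [Int.sub_zero, Int.toNat_natCast, Int.zero_add, List.map_map, Function.comp_def]
    have key : (List.range n).map (fun k : Nat => pvBodyA (k : Int)) =
        (List.replicate (n / 100) pvPeriod).flatten ++ pvPeriod.take (n % 100) := by
      rw [← pvTile pvPeriod pvPeriod_length n]
      exact List.map_congr_left (fun k _ => pvBodyA_nat k)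
    have hdv : PySem.Int.floordiv (n : Int) 100 = ((n / 100 : Nat) : Int) := by
      exact_mod_cast PySem.Int.floordiv_natCast n 100
    have hmd : PySem.Int.mod (n : Int) 100 = ((n % 100 : Nat) : Int) := by
      exact_mod_cast PySem.Int.mod_natCast n 100
    rw [key, hdv, hmd, PySem.List.slice_to_natCast]
    simp only [PySem.List.pyRepeat, Int.toNat_natCast]
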